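-- pv_equiv track=rewrite | github.com/JudseFasa/prueba-n8n | scraper_massive/scraper_core/fase_extractor.py | extraer_fase_nombre
-- ===== SOURCE A (Python) =====
-- def extraer_fase_nombre(fase_texto):
--     """Detecta si una fase es especial y extrae su nombre"""
--     palabras_clave = [
--         "cuadrangular", "play off", "play-off", "playoffs",
--         "conference", "descenso", "grupo de campeonato",
--         "clausura", "apertura", "final", "liguilla", "play-out"
--     ]
--
--     lower = fase_texto.lower()
--     for palabra in palabras_clave:
--         if palabra in lower:
--             return "especial"
--     return "regular"
-- ===== SOURCE B (Python) =====
-- PALABRAS_CLAVE = (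
--     "cuadrangular", "play off", "play-off", "playoffs",
--     "conference", "descenso", "grupo de campeonato",
--     "clausura", "apertura", "final", "liguilla", "play-out"
-- )
--
-- def extraer_fase_nombre(fase_texto):
--     """Detecta si una fase es especial y extrae su nombre"""
--     lower = fase_texto.lower()
--     # single left-to-right scan over positions; at each position test whether
--     # some keyword starts there (position-major instead of keyword-major)
--     for i in range(len(lower)):
--         if any(lower.startswith(k, i) for k in PALABRAS_CLAVE):
--             return "especial"
--     return "regular"
-- ===== Notes on version B (the rewrite author's own statement) =====
-- stated objective: alternative
-- what changed: B replaces A's keyword-major loop of independent whole-string substring-membership tests with a single position-major scan of the lowered string, testing at each position whether any keyword starts there (early exit at the first match position).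
import Mathlib
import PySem

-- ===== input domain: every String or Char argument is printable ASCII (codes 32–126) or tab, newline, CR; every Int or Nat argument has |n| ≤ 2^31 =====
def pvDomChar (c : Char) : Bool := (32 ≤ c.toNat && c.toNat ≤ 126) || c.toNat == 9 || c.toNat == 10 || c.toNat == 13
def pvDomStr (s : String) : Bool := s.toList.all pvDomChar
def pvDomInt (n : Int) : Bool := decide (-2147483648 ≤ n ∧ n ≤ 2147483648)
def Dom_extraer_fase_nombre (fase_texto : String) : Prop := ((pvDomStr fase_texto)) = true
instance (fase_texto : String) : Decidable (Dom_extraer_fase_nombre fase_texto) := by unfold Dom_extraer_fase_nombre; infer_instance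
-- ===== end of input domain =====

-- B replaces A's keyword-major loop of substring tests by one position-major scan of the
-- lowered string (at each position, test whether some keyword starts there); alternative, not faster.

def palabras_clave : List String :=
  ["cuadrangular", "play off", "play-off", "playoffs",
   "conference", "descenso", "grupo de campeonato",
   "clausura", "apertura", "final", "liguilla", "play-out"]

-- ===== PORT A =====
-- the 'for palabra in palabras_clave: if palabra in lower: return "especial"' loop
def loopA : List String → String → String
  | [], _ => "regular"
  | palabra :: rest, lower =>
      if PySem.Str.isIn palabra lower then "especial" else loopA rest lower

def extraer_fase_nombre (fase_texto : String) : String :=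
  loopA palabras_clave (PySem.Str.lower fase_texto)

-- ===== PORT B =====
-- 'for i in range(len(lower)): if any(lower.startswith(k, i) ...): return "especial"';
-- lower.startswith(k, i) is ported as startswith on (lower.drop i): exact for 0 ≤ i ≤ len(lower)
def loopB (lower : List Char) : List Nat → String
  | [] => "regular"
  | i :: rest =>
      if palabras_clave.any (fun k => PySem.Chars.startswith (lower.drop i) k.toList)
      then "especial" else loopB lower rest

def extraer_fase_nombre_alt (fase_texto : String) : String :=
  let lower := (PySem.Str.lower fase_texto).toList
  loopB lower (List.range lower.length)

-- ===== PRECONDITION & SPEC =====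
def Spec_extraer_fase_nombre (fase_texto : String) (out : String) : Prop := out = extraer_fase_nombre_alt fase_texto
instance (fase_texto : String) (out : String) : Decidable (Spec_extraer_fase_nombre fase_texto out) := by unfold Spec_extraer_fase_nombre; infer_instance

-- ===== CLAIM (what is proved, stated in full; the proofs are below) =====
def Claim_equal_extraer_fase_nombre : Prop := ∀ (fase_texto : String), Dom_extraer_fase_nombre fase_texto → Spec_extraer_fase_nombre fase_texto (extraer_fase_nombre fase_texto)

-- ===== LEMMAS AND PROOFS =====

theorem loopA_eq (ks : List String) (lower : String) :
    loopA ks lower =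
      if ks.any (fun k => PySem.Str.isIn k lower) then "especial" else "regular" := by
  induction ks with
  | nil => simp [loopA]
  | cons k rest ih =>
      rw [loopA, ih, List.any_cons]
      by_cases h : PySem.Str.isIn k lower = true <;> simp only [h, Bool.true_or, Bool.false_or,
        if_true, if_false, Bool.false_eq_true]

theorem loopB_eq (lower : List Char) (l : List Nat) :
    loopB lower l =
      if l.any (fun i => palabras_clave.any
          (fun k => PySem.Chars.startswith (lower.drop i) k.toList))
      then "especial" else "regular" := by
  induction l with
  | nil => simp [loopB]
  | cons i rest ih =>
      rw [loopB, ih, List.any_cons]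
      by_cases h : palabras_clave.any
          (fun k => PySem.Chars.startswith (lower.drop i) k.toList) = true <;> simp only [h,
        Bool.true_or, Bool.false_or, if_true, if_false, Bool.false_eq_true]

theorem keys_nonempty : ∀ k ∈ palabras_clave, k.toList ≠ [] := by decide

theorem scan_eq_isIn (lower : List Char) :
    ((List.range lower.length).any (fun i => palabras_clave.any
        (fun k => PySem.Chars.startswith (lower.drop i) k.toList)) = true)
      ↔ (palabras_clave.any (fun k => PySem.Chars.isIn k.toList lower) = true) := by
  simp only [List.any_eq_true, List.mem_range, PySem.Chars.startswith_iff]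
  constructor
  · rintro ⟨i, _, k, hk, hpre⟩
    exact ⟨k, hk, (PySem.Chars.exists_prefix_drop_iff_isIn ..).mp ⟨i, hpre⟩⟩
  · rintro ⟨k, hk, hin⟩
    obtain ⟨j, hpre⟩ := (PySem.Chars.exists_prefix_drop_iff_isIn ..).mpr hin
    refine ⟨j, ?_, k, hk, hpre⟩
    by_contra hj
    have hdrop : lower.drop j = [] := List.drop_eq_nil_of_le (by omega)
    rw [hdrop, List.prefix_nil] at hpre
    exact keys_nonempty k hk hpre

-- ===== VERDICT (by name: the statement is the Claim_ definition above) =====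
theorem extraer_fase_nombre_spec : Claim_equal_extraer_fase_nombre := by
  intro s _
  show extraer_fase_nombre s = extraer_fase_nombre_alt s
  rw [extraer_fase_nombre, extraer_fase_nombre_alt, loopA_eq, loopB_eq]
  have hbridge : ∀ k : String, PySem.Str.isIn k (PySem.Str.lower s) =
      PySem.Chars.isIn k.toList (PySem.Str.lower s).toList := by
    intro k; simp [PySem.Str.isIn_eq]
  by_cases h : ((List.range (PySem.Str.lower s).toList.length).any
      (fun i => palabras_clave.any
        (fun k => PySem.Chars.startswith ((PySem.Str.lower s).toList.drop i) k.toList)) = true)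
  · have h2 := (scan_eq_isIn _).mp h
    simp only [hbridge]
    rw [if_pos h2, if_pos h]
  · have h2 : ¬ (palabras_clave.any
        (fun k => PySem.Chars.isIn k.toList (PySem.Str.lower s).toList) = true) :=
      fun hc => h ((scan_eq_isIn _).mpr hc)
    simp only [hbridge]
    rw [if_neg h2, if_neg h]
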